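-- pv_equiv track=rewrite | github.com/sythello/PowerGrid | src/powergrid/model.py | _next_auction_chooser
-- ===== SOURCE A (Python) =====
-- def _next_auction_chooser(
--     player_order: tuple[str, ...],
--     current_player_id: str | None,
--     players_with_plants: tuple[str, ...],
--     players_passed_phase: tuple[str, ...],
-- ) -> str | None:
--     excluded = set(players_with_plants) | set(players_passed_phase)
--     eligible = tuple(player_id for player_id in player_order if player_id not in excluded)
--     if not eligible:
--         return None
--     if current_player_id is None:
--         return eligible[0]
--     for offset in range(1, len(player_order) + 1):
--         candidate = player_order[(player_order.index(current_player_id) + offset) % len(player_order)]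
--         if candidate not in excluded:
--             return candidate
--     return None
-- ===== SOURCE B (Python) =====
-- def _next_auction_chooser(
--     player_order,
--     current_player_id,
--     players_with_plants,
--     players_passed_phase,
-- ):
--     excluded = set(players_with_plants) | set(players_passed_phase)
--     eligible = [(i, p) for i, p in enumerate(player_order) if p not in excluded]
--     if not eligible:
--         return None
--     if current_player_id is None:
--         return eligible[0][1]
--     idx = player_order.index(current_player_id)
--     for i, p in eligible:
--         if i > idx:
--             return p
--     return eligible[0][1]
-- ===== Notes on version B (the rewrite author's own statement) =====
-- stated objective: alternative
-- what changed: A probes player_order cyclically with modular arithmetic, recomputing player_order.index(current_player_id) and re-testing exclusion at every offset; B builds the eligible list once with positions attached (enumerate), looks the current index up once, and does a single forward pass returning the first eligible player positioned after it, wrapping to the first eligible.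
import Mathlib
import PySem

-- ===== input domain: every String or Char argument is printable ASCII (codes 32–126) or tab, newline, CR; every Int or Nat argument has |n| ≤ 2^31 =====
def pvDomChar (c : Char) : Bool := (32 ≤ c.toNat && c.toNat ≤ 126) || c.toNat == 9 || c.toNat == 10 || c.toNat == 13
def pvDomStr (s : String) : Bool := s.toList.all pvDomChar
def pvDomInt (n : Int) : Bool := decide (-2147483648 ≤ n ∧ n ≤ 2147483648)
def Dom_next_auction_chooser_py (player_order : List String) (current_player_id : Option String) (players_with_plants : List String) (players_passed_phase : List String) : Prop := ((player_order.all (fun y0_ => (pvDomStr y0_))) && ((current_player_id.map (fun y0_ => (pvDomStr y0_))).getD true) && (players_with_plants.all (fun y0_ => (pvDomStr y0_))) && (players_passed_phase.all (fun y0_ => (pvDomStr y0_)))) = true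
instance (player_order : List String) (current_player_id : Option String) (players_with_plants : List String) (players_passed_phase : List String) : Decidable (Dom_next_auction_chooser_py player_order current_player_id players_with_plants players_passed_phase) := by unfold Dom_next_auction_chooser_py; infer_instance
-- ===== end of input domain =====

-- B replaces A's cyclic modular probe (which recomputes index() each offset) by one indexed
-- pass over the pre-filtered eligible players; same return value on all of Pre_.

-- ===== PORT A =====
-- the body of A's for-loop over offsets, with the early return threaded through acc
def nacStepA (excluded : PySem.Set String) (player_order : List String) (c : String)
    (acc : Option String) (offset : Int) : Option String :=
  match acc with
  | some r => some r
  | none =>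
    match PySem.List.index? player_order c with
    | none => none  -- player_order.index raises ValueError here; excluded by Pre_
    | some idx =>
      match PySem.List.pyGet? player_order
          (PySem.Int.mod ((idx : Int) + offset) (player_order.length : Int)) with
      | none => none
      | some candidate =>
        if PySem.Set.contains excluded candidate then none else some candidate

def next_auction_chooser_py (player_order : List String) (current_player_id : Option String) (players_with_plants : List String) (players_passed_phase : List String) : Option String :=
  let excluded : PySem.Set String :=
    PySem.Set.union (PySem.Set.ofList players_with_plants) (PySem.Set.ofList players_passed_phase)
  let eligible : List String := player_order.filter (fun p => !(PySem.Set.contains excluded p))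
  if eligible = [] then none
  else
    match current_player_id with
    | none => eligible[0]?
    | some c =>
      (PySem.List.pyRange 1 ((player_order.length : Int) + 1) 1).foldl
        (nacStepA excluded player_order c) none

-- ===== PORT B =====
def next_auction_chooser_py_alt (player_order : List String) (current_player_id : Option String) (players_with_plants : List String) (players_passed_phase : List String) : Option String :=
  let excluded : PySem.Set String :=
    PySem.Set.union (PySem.Set.ofList players_with_plants) (PySem.Set.ofList players_passed_phase)
  let eligible : List (Int × String) :=
    (PySem.List.enumerate player_order 0).filter (fun ip => !(PySem.Set.contains excluded ip.2))
  match eligible with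
  | [] => none
  | first :: _ =>
    match current_player_id with
    | none => some first.2
    | some c =>
      match PySem.List.index? player_order c with
      | none => none  -- player_order.index raises ValueError here; excluded by Pre_
      | some idx =>
        match eligible.find? (fun ip => decide ((idx : Int) < ip.1)) with
        | some ip => some ip.2
        | none => some first.2

-- ===== PRECONDITION & SPEC =====
-- Pre_ excludes exactly the inputs where Python A raises ValueError (a current player id that is
-- absent from player_order while some player is still eligible); B raises the same error there.
def Pre_next_auction_chooser_py (player_order : List String) (current_player_id : Option String) (players_with_plants : List String) (players_passed_phase : List String) : Prop :=
  (current_player_id.all (fun c =>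
      player_order.contains c
      || player_order.all (fun p =>
          players_with_plants.contains p || players_passed_phase.contains p))) = true
instance (player_order : List String) (current_player_id : Option String) (players_with_plants : List String) (players_passed_phase : List String) : Decidable (Pre_next_auction_chooser_py player_order current_player_id players_with_plants players_passed_phase) := by unfold Pre_next_auction_chooser_py; infer_instance

def pvWitness_next_auction_chooser_py : List String × Option String × List String × List String :=
  (["a", "b", "c"], some "a", ["b"], [])

def Spec_next_auction_chooser_py (player_order : List String) (current_player_id : Option String) (players_with_plants : List String) (players_passed_phase : List String) (out : Option String) : Prop := out = next_auction_chooser_py_alt player_order current_player_id players_with_plants players_passed_phase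
instance (player_order : List String) (current_player_id : Option String) (players_with_plants : List String) (players_passed_phase : List String) (out : Option String) : Decidable (Spec_next_auction_chooser_py player_order current_player_id players_with_plants players_passed_phase out) := by unfold Spec_next_auction_chooser_py; infer_instance

-- ===== CLAIM (what is proved, stated in full; the proofs are below) =====
def Claim_equal_next_auction_chooser_py : Prop := ∀ (player_order : List String) (current_player_id : Option String) (players_with_plants : List String) (players_passed_phase : List String), Dom_next_auction_chooser_py player_order current_player_id players_with_plants players_passed_phase → Pre_next_auction_chooser_py player_order current_player_id players_with_plants players_passed_phase → Spec_next_auction_chooser_py player_order current_player_id players_with_plants players_passed_phase (next_auction_chooser_py player_order current_player_id players_with_plants players_passed_phase)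

-- ===== LEMMAS AND PROOFS =====

-- the one-step eligibility body both sides reduce to, for a fixed excluded list
def nacBody (ex : List String) (p : String) : Option String :=
  if p ∈ ex then none else some p

theorem nac_body_eq (ex : List String) (p : String) :
    (if PySem.Set.contains ex p then none else some p) = nacBody ex p := by
  by_cases h : p ∈ ex <;> simp [nacBody, h]

-- A's probe at an absolute position
def nacGetF (ex : PySem.Set String) (po : List String) (j : Int) : Option String :=
  match PySem.List.pyGet? po j with
  | none => none
  | some candidate => nacBody ex candidate

-- A's probe at a cyclic offset from idx
def nacProbe (ex : PySem.Set String) (po : List String) (idx : Nat) (offset : Int) : Option String :=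
  nacGetF ex po (PySem.Int.mod ((idx : Int) + offset) (po.length : Int))

-- A's early-return loop is findSome? of the probe
theorem nac_foldl_stepA (ex : PySem.Set String) (po : List String) (c : String) (idx : Nat)
    (hidx : PySem.List.index? po c = some idx) (l : List Int) (acc : Option String) :
    l.foldl (nacStepA ex po c) acc = acc.or (l.findSome? (nacProbe ex po idx)) := by
  induction l generalizing acc with
  | nil => simp
  | cons x t ih =>
    have hstep : nacStepA ex po c none x = nacProbe ex po idx x := by
      simp only [nacStepA, hidx, nacProbe, nacGetF]
      cases PySem.List.pyGet? po (PySem.Int.mod ((idx : Int) + x) (po.length : Int)) with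
      | none => rfl
      | some cand => exact nac_body_eq ex cand
    cases acc with
    | some r =>
      rw [List.foldl_cons, ih]
      simp [nacStepA]
    | none =>
      rw [List.foldl_cons, ih, hstep, List.findSome?_cons, Option.none_or]
      cases nacProbe ex po idx x <;> simp

theorem nac_findSome?_congr_mem {α β : Type} {l : List α} {f g : α → Option β}
    (h : ∀ x ∈ l, f x = g x) : l.findSome? f = l.findSome? g := by
  induction l with
  | nil => rfl
  | cons x t ih =>
    rw [List.findSome?_cons, List.findSome?_cons, h x (by simp),
      ih (fun y hy => h y (by simp [hy]))]

theorem nac_findSome?_pyRange_shift {β : Type} (a b k : Int) (f : Int → Option β) :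
    (PySem.List.pyRange a b 1).findSome? (fun j => f (j + k))
      = (PySem.List.pyRange (a + k) (b + k) 1).findSome? f := by
  rw [PySem.List.pyRange_one a b, PySem.List.pyRange_one (a + k) (b + k)]
  rw [List.findSome?_map, List.findSome?_map]
  have hb : b + k - (a + k) = b - a := by ring
  rw [hb]
  exact nac_findSome?_congr_mem (fun x _ => by simp only [Function.comp]; ring_nf)

-- the filtered enumeration projects to the plain filtered list
theorem nac_filter_enumerate_map_snd (ex : List String) (l : List String) (s : Int) :
    (((PySem.List.enumerate l s).filter (fun ip => !(PySem.Set.contains ex ip.2))).map Prod.snd)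
      = l.filter (fun p => !(PySem.Set.contains ex p)) := by
  induction l generalizing s with
  | nil => simp [PySem.List.enumerate_nil]
  | cons x t ih =>
    rw [PySem.List.enumerate_cons]
    by_cases h : x ∈ ex
    · simpa [h] using ih (s + 1)
    · simpa [h] using ih (s + 1)

-- find? over an all-past-the-index enumeration is the plain findSome? of the body
theorem nac_find_enumerate_hi (ex : List String) (idx : Int) (l : List String) (s : Int)
    (hs : idx < s) :
    ((PySem.List.enumerate l s).find?
        (fun ip => !(PySem.Set.contains ex ip.2) && decide (idx < ip.1))).map Prod.snd
      = l.findSome? (nacBody ex) := by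
  induction l generalizing s with
  | nil => simp [PySem.List.enumerate_nil]
  | cons x t ih =>
    rw [PySem.List.enumerate_cons, List.find?_cons]
    by_cases h : x ∈ ex
    · simpa [h, List.findSome?_cons, nacBody] using ih (s + 1) (by omega)
    · simp [h, hs, nacBody]

-- find? over an all-at-or-before-the-index enumeration finds nothing
theorem nac_find_enumerate_lo (ex : List String) (idx : Int) (l : List String) (s : Int)
    (hs : s + l.length ≤ idx + 1) :
    (PySem.List.enumerate l s).find?
        (fun ip => !(PySem.Set.contains ex ip.2) && decide (idx < ip.1)) = none := by
  rw [List.find?_eq_none]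
  intro ip hip
  rw [PySem.List.mem_enumerate_iff] at hip
  obtain ⟨k, hk, rfl⟩ := hip
  simp only [Bool.and_eq_true, decide_eq_true_eq, not_and]
  intro _
  omega

-- find? of the eligibility test is findSome? of the body
theorem nac_find_eq_findSome (ex : List String) (l : List String) :
    l.find? (fun p => !(PySem.Set.contains ex p)) = l.findSome? (nacBody ex) := by
  induction l with
  | nil => rfl
  | cons x t ih =>
    rw [List.find?_cons, List.findSome?_cons]
    by_cases h : x ∈ ex
    · simpa [h, nacBody] using ih
    · simp [h, nacBody]

theorem nac_AB (po : List String) (cur : Option String) (pwp pp : List String)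
    (hpre : ∀ c, cur = some c → c ∉ po → ∀ p ∈ po, p ∈ pwp ∨ p ∈ pp) :
    next_auction_chooser_py po cur pwp pp = next_auction_chooser_py_alt po cur pwp pp := by
  have hccE : ∀ p : String,
      PySem.Set.contains (PySem.Set.union (PySem.Set.ofList pwp) (PySem.Set.ofList pp)) p = true
        ↔ (p ∈ pwp ∨ p ∈ pp) := by
    intro p
    rw [PySem.Set.contains_iff, PySem.Set.mem_union, PySem.Set.mem_ofList, PySem.Set.mem_ofList]
  simp only [next_auction_chooser_py, next_auction_chooser_py_alt]
  generalize hE : PySem.Set.union (PySem.Set.ofList pwp) (PySem.Set.ofList pp) = ex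
  rw [hE] at hccE
  cases hfe : po.filter (fun p => !(PySem.Set.contains ex p)) with
  | nil =>
    have hB : (PySem.List.enumerate po 0).filter (fun ip => !(PySem.Set.contains ex ip.2)) = [] := by
      have h := nac_filter_enumerate_map_snd ex po 0
      rw [hfe] at h
      exact List.map_eq_nil_iff.mp h
    rw [hB]
    simp
  | cons e0 erest =>
    obtain ⟨b0, brest, hBfe⟩ :
        ∃ b0 brest, (PySem.List.enumerate po 0).filter (fun ip => !(PySem.Set.contains ex ip.2))
          = b0 :: brest := by
      cases hB : (PySem.List.enumerate po 0).filter (fun ip => !(PySem.Set.contains ex ip.2)) with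
      | nil =>
        have h := nac_filter_enumerate_map_snd ex po 0
        rw [hB, hfe] at h
        simp at h
      | cons a l => exact ⟨a, l, rfl⟩
    have hmap := nac_filter_enumerate_map_snd ex po 0
    rw [hfe, hBfe] at hmap
    simp only [List.map_cons, List.cons.injEq] at hmap
    rw [hBfe, if_neg (List.cons_ne_nil _ _)]
    cases cur with
    | none =>
      simp [hmap.1]
    | some c =>
      by_cases hcpo : c ∈ po
      · obtain ⟨idx, hidx⟩ := Option.isSome_iff_exists.mp
          ((PySem.List.index?_isSome_iff po c).mpr hcpo)
        obtain ⟨hk, hval, hmin⟩ := PySem.List.getElem_of_index?_eq_some hidx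
        simp only [hidx]
        rw [nac_foldl_stepA ex po c idx hidx, Option.none_or]
        rw [PySem.List.pyRange_one_append 1 ((po.length : Int) - idx) ((po.length : Int) + 1)
          (by omega) (by omega), List.findSome?_append]
        have h1 : (PySem.List.pyRange 1 ((po.length : Int) - idx)).findSome? (nacProbe ex po idx)
            = (po.drop (idx + 1)).findSome? (nacBody ex) := by
          have hcg : ∀ o ∈ PySem.List.pyRange 1 ((po.length : Int) - idx),
              nacProbe ex po idx o = nacGetF ex po (o + (idx : Int)) := by
            intro o ho
            rw [PySem.List.mem_pyRange_one] at ho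
            have hm : PySem.Int.mod ((idx : Int) + o) (po.length : Int) = o + (idx : Int) := by
              rw [PySem.Int.mod_eq_emod_of_pos (by omega),
                Int.emod_eq_of_lt (by omega) (by omega)]
              ring
            simp only [nacProbe, hm]
          rw [nac_findSome?_congr_mem hcg,
            nac_findSome?_pyRange_shift 1 ((po.length : Int) - idx) (idx : Int) (nacGetF ex po)]
          rw [show (1 : Int) + (idx : Int) = ((idx : Int) + 1) from by ring,
            show ((po.length : Int) - idx) + idx = (po.length : Int) from by ring]
          have hcg2 : ∀ j ∈ PySem.List.pyRange ((idx : Int) + 1) (po.length : Int),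
              nacGetF ex po j = ((nacBody ex) ∘ (fun j => PySem.List.pyGetD po j "")) j := by
            intro j hj
            rw [PySem.List.mem_pyRange_one] at hj
            simp only [Function.comp, nacGetF]
            rw [PySem.List.pyGet?_eq_some_getElem po (by omega) (by omega),
              PySem.List.pyGetD_eq_getElem po "" (by omega) (by omega)]
          rw [nac_findSome?_congr_mem hcg2, ← List.findSome?_map,
            PySem.List.map_pyGetD_pyRange' po "" (by omega),
            show ((idx : Int) + 1).toNat = idx + 1 from by omega]
        have h2 : (PySem.List.pyRange ((po.length : Int) - idx) ((po.length : Int) + 1)).findSome?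
              (nacProbe ex po idx)
            = (po.take (idx + 1)).findSome? (nacBody ex) := by
          have hcg : ∀ o ∈ PySem.List.pyRange ((po.length : Int) - idx) ((po.length : Int) + 1),
              nacProbe ex po idx o = nacGetF ex po (o + ((idx : Int) - (po.length : Int))) := by
            intro o ho
            rw [PySem.List.mem_pyRange_one] at ho
            have hm : PySem.Int.mod ((idx : Int) + o) (po.length : Int)
                = o + ((idx : Int) - (po.length : Int)) := by
              rw [PySem.Int.mod_eq_emod_of_pos (by omega),
                show ((idx : Int) + o) = ((idx : Int) + o - (po.length : Int)) + (po.length : Int) * 1 from by ring,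
                Int.add_mul_emod_self_left,
                Int.emod_eq_of_lt (by omega) (by omega)]
              ring
            simp only [nacProbe, hm]
          rw [nac_findSome?_congr_mem hcg,
            nac_findSome?_pyRange_shift ((po.length : Int) - idx) ((po.length : Int) + 1)
              ((idx : Int) - (po.length : Int)) (nacGetF ex po)]
          rw [show ((po.length : Int) - idx) + ((idx : Int) - (po.length : Int)) = 0 from by ring,
            show ((po.length : Int) + 1) + ((idx : Int) - (po.length : Int)) = (idx : Int) + 1 from by ring]
          have hlen : ((po.take (idx + 1)).length : Int) = (idx : Int) + 1 := by
            rw [show (po.take (idx + 1)).length = idx + 1 from by rw [List.length_take]; omega]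
            push_cast
            ring
          have hcg2 : ∀ j ∈ PySem.List.pyRange 0 ((idx : Int) + 1),
              nacGetF ex po j
              = ((nacBody ex) ∘ (fun j => PySem.List.pyGetD (po.take (idx + 1)) j "")) j := by
            intro j hj
            rw [PySem.List.mem_pyRange_one] at hj
            simp only [Function.comp, nacGetF]
            rw [PySem.List.pyGet?_eq_some_getElem po (by omega) (by omega),
              PySem.List.pyGetD_eq_getElem (po.take (idx + 1)) "" (by omega)
                (by simp only [List.length_take]; push_cast; omega)]
            simp [List.getElem_take]
          rw [nac_findSome?_congr_mem hcg2, ← List.findSome?_map,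
            ← hlen, PySem.List.map_pyGetD_pyRange_zero' (po.take (idx + 1)) ""]
        rw [h1, h2]
        have hBfind : ((b0 :: brest).find? (fun ip => decide ((idx : Int) < ip.1))).map Prod.snd
            = (po.drop (idx + 1)).findSome? (nacBody ex) := by
          rw [← hBfe, List.find?_filter]
          have hfun : (fun a : Int × String =>
                decide ((!PySem.Set.contains ex a.2) = true ∧ (decide ((idx : Int) < a.1)) = true))
              = (fun ip : Int × String =>
                !(PySem.Set.contains ex ip.2) && decide ((idx : Int) < ip.1)) := by
            funext a
            by_cases h : a.2 ∈ ex <;> by_cases h2 : (idx : Int) < a.1 <;> simp [h, h2]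
          rw [hfun]
          have hsplitE : PySem.List.enumerate po 0
              = PySem.List.enumerate (po.take (idx + 1)) 0
                ++ PySem.List.enumerate (po.drop (idx + 1)) ((idx : Int) + 1) := by
            conv_lhs => rw [← List.take_append_drop (idx + 1) po]
            rw [PySem.List.enumerate_append]
            congr 1
            rw [show (po.take (idx + 1)).length = idx + 1 from by rw [List.length_take]; omega]
            push_cast
            ring
          rw [hsplitE, List.find?_append,
            nac_find_enumerate_lo ex (idx : Int) _ 0
              (by rw [show (po.take (idx + 1)).length = idx + 1 from by rw [List.length_take]; omega]
                  push_cast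
                  omega),
            Option.none_or]
          exact nac_find_enumerate_hi ex (idx : Int) _ ((idx : Int) + 1) (by omega)
        cases hD : (po.drop (idx + 1)).findSome? (nacBody ex) with
        | some v =>
          rw [hD] at hBfind
          obtain ⟨ip, hip, hip2⟩ := Option.map_eq_some_iff.mp hBfind
          rw [hip]
          simp [hip2]
        | none =>
          rw [hD] at hBfind
          have hfind0 : (b0 :: brest).find? (fun ip => decide ((idx : Int) < ip.1)) = none := by
            cases hf : (b0 :: brest).find? (fun ip => decide ((idx : Int) < ip.1)) with
            | none => rfl
            | some ip => rw [hf] at hBfind; simp at hBfind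
          rw [Option.none_or, hfind0]
          have hfull : po.findSome? (nacBody ex) = some e0 := by
            rw [← nac_find_eq_findSome, ← List.head?_filter, hfe]
            rfl
          have hT : po.findSome? (nacBody ex) = (po.take (idx + 1)).findSome? (nacBody ex) := by
            conv_lhs => rw [← List.take_append_drop (idx + 1) po]
            rw [List.findSome?_append, hD, Option.or_none]
          rw [← hT, hfull, hmap.1]
      · exfalso
        have hall := hpre c rfl hcpo
        have hnil : po.filter (fun p => !(PySem.Set.contains ex p)) = [] := by
          rw [List.filter_eq_nil_iff]
          intro p hp
          simp
          exact (PySem.Set.contains_iff ex p).mp ((hccE p).mpr (hall p hp))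
        rw [hfe] at hnil
        exact List.cons_ne_nil _ _ hnil

-- ===== VERDICT (by name: the statement is the Claim_ definition above) =====
theorem next_auction_chooser_py_spec : Claim_equal_next_auction_chooser_py := by
  intro po cur pwp pp _ hpre
  unfold Spec_next_auction_chooser_py
  apply nac_AB
  intro c hc hcpo
  unfold Pre_next_auction_chooser_py at hpre
  subst hc
  simp only [Option.all_some, Bool.or_eq_true, List.contains_iff_mem, List.all_eq_true] at hpre
  rcases hpre with h | h
  · exact absurd h hcpo
  · intro p hp
    simpa using h p hp
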